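-- pv_equiv track=rewrite | github.com/martin-ueding/project-euler-solutions | solution_68.py | triangle_solution_string
-- ===== SOURCE A (Python) =====
-- def shift_lines(lines: list[tuple]) -> list[tuple]:
--     starts = [line[0] for line in lines]
--     min_start = min(starts)
--     while lines[0][0] != min_start:
--         lines = lines[1:] + lines[:1]
--     return lines
--
-- def triangle_solution_string(coefficients: list[int]) -> int:
--     lines = [
--         (coefficients[0], coefficients[1], coefficients[2]),
--         (coefficients[3], coefficients[2], coefficients[4]),
--         (coefficients[5], coefficients[4], coefficients[1]),
--     ]
--     lines = shift_lines(lines)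
--     return int("".join(map(str, (number for line in lines for number in line))))
-- ===== SOURCE B (Python) =====
-- def triangle_solution_string(coefficients: list[int]) -> int:
--     triples = [
--         (coefficients[0], coefficients[1], coefficients[2]),
--         (coefficients[3], coefficients[2], coefficients[4]),
--         (coefficients[5], coefficients[4], coefficients[1]),
--     ]
--     # first argmin of the starting numbers, found by a direct scan (no rotation loop)
--     idx = 0
--     if triples[1][0] < triples[idx][0]:
--         idx = 1
--     if triples[2][0] < triples[idx][0]:
--         idx = 2
--     return int("".join(str(n) for i in range(3) for n in triples[(idx + i) % 3]))
-- ===== Notes on version B (the rewrite author's own statement) =====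
-- stated objective: simpler
-- what changed: The rotate-until-minimum while loop (repeatedly rebuilding the list as lines[1:]+lines[:1]) is replaced by a direct first-argmin scan over the three starting numbers followed by modular indexing, so no rotation loop and no intermediate lists are built.
import Mathlib
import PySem

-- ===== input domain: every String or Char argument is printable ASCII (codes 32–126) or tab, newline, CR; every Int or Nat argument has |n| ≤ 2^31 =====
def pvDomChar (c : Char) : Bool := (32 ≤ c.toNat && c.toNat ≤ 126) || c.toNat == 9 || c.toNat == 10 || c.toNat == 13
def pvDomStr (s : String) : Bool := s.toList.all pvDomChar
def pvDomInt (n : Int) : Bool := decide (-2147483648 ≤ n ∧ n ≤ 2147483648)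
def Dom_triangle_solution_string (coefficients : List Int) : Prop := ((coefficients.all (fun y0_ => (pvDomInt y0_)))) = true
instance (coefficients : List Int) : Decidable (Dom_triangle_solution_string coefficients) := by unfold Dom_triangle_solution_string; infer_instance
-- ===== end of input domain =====

-- B replaces A's rotate-until-minimum while loop by a first-argmin scan plus modular indexing (objective: simpler).

-- ===== PORT A =====
-- the while loop of shift_lines, with fuel = len(lines); the loop rotates at most len-1 times
def pvShiftLines (fuel : Nat) (minStart : Int) (lines : List (Int × Int × Int)) : List (Int × Int × Int) :=
  match fuel with
  | 0 => lines
  | Nat.succ f =>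
    match lines with
    | [] => lines
    | l :: rest => if l.1 ≠ minStart then pvShiftLines f minStart (rest ++ [l]) else l :: rest

def triangle_solution_string (coefficients : List Int) : Int :=
  let lines : List (Int × Int × Int) :=
    [(PySem.List.pyGetD coefficients 0 0, PySem.List.pyGetD coefficients 1 0, PySem.List.pyGetD coefficients 2 0),
     (PySem.List.pyGetD coefficients 3 0, PySem.List.pyGetD coefficients 2 0, PySem.List.pyGetD coefficients 4 0),
     (PySem.List.pyGetD coefficients 5 0, PySem.List.pyGetD coefficients 4 0, PySem.List.pyGetD coefficients 1 0)]
  let starts := lines.map (fun line => line.1)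
  let minStart := (PySem.List.min? starts id).getD 0
  let lines2 := pvShiftLines lines.length minStart lines
  (PySem.Int.ofStr? (PySem.Str.join "" ((lines2.flatMap (fun l => [l.1, l.2.1, l.2.2])).map PySem.Int.toStr))).getD 0

-- ===== PORT B =====
def triangle_solution_string_alt (coefficients : List Int) : Int :=
  let triples : List (Int × Int × Int) :=
    [(PySem.List.pyGetD coefficients 0 0, PySem.List.pyGetD coefficients 1 0, PySem.List.pyGetD coefficients 2 0),
     (PySem.List.pyGetD coefficients 3 0, PySem.List.pyGetD coefficients 2 0, PySem.List.pyGetD coefficients 4 0),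
     (PySem.List.pyGetD coefficients 5 0, PySem.List.pyGetD coefficients 4 0, PySem.List.pyGetD coefficients 1 0)]
  let t := fun (i : Int) => PySem.List.pyGetD triples i (0, 0, 0)
  let idx : Int := 0
  let idx : Int := if (t 1).1 < (t idx).1 then 1 else idx
  let idx : Int := if (t 2).1 < (t idx).1 then 2 else idx
  let strs := (PySem.List.pyRange 0 3 1).foldl (fun acc (i : Int) =>
      let l := t ((idx + i).emod 3)
      acc ++ [PySem.Int.toStr l.1, PySem.Int.toStr l.2.1, PySem.Int.toStr l.2.2]) []
  (PySem.Int.ofStr? (PySem.Str.join "" strs)).getD 0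

-- ===== PRECONDITION & SPEC =====
-- Pre_ = exactly the inputs where A returns: at least 6 coefficients (else IndexError) and the
-- concatenated string is a valid int literal, i.e. no interior minus sign: the values at
-- positions 1, 2 and 4 are nonnegative and at most one of the three line starts (positions
-- 0, 3 and 5) is negative (that one, being the minimum, is rotated to the front);
-- otherwise int() raises ValueError.
def Pre_triangle_solution_string (coefficients : List Int) : Prop :=
  6 ≤ coefficients.length ∧
  0 ≤ coefficients.getD 1 0 ∧ 0 ≤ coefficients.getD 2 0 ∧ 0 ≤ coefficients.getD 4 0 ∧
  ((if coefficients.getD 0 0 < 0 then 1 else 0) +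
   (if coefficients.getD 3 0 < 0 then 1 else 0) +
   (if coefficients.getD 5 0 < 0 then 1 else 0) : Nat) ≤ 1
instance (coefficients : List Int) : Decidable (Pre_triangle_solution_string coefficients) := by
  unfold Pre_triangle_solution_string; infer_instance

def pvWitness_triangle_solution_string : List Int := [1, 2, 3, 4, 5, 6]

def Spec_triangle_solution_string (coefficients : List Int) (out : Int) : Prop := out = triangle_solution_string_alt coefficients
instance (coefficients : List Int) (out : Int) : Decidable (Spec_triangle_solution_string coefficients out) := by unfold Spec_triangle_solution_string; infer_instance

-- ===== CLAIM (what is proved, stated in full; the proofs are below) =====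
def Claim_equal_triangle_solution_string : Prop := ∀ (coefficients : List Int), Dom_triangle_solution_string coefficients → Pre_triangle_solution_string coefficients → Spec_triangle_solution_string coefficients (triangle_solution_string coefficients)

-- ===== LEMMAS AND PROOFS =====

-- ===== VERDICT (by name: the statement is the Claim_ definition above) =====
theorem triangle_solution_string_spec : Claim_equal_triangle_solution_string := by
  intro coefficients _ _
  unfold Spec_triangle_solution_string triangle_solution_string triangle_solution_string_alt
  have hr : PySem.List.pyRange 0 3 1 = [0, 1, 2] := by decide
  set a0 := PySem.List.pyGetD coefficients 0 0 with ha0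
  set a1 := PySem.List.pyGetD coefficients 1 0 with ha1
  set a2 := PySem.List.pyGetD coefficients 2 0 with ha2
  set a3 := PySem.List.pyGetD coefficients 3 0 with ha3
  set a4 := PySem.List.pyGetD coefficients 4 0 with ha4
  set a5 := PySem.List.pyGetD coefficients 5 0 with ha5
  rw [hr]
  by_cases h1 : a3 < a0 <;> by_cases h2 : a5 < (if a3 < a0 then a3 else a0) <;>
    rw [show (if a3 < a0 then a3 else a0) = (if a3 < a0 then a3 else a0) from rfl] at h2
  · -- a3 < a0, a5 < a3 : min = a5, idx = 2
    rw [if_pos h1] at h2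
    simp [PySem.List.min?, pvShiftLines, PySem.List.pyGetD, PySem.List.pyGet?, PySem.List.pyIdx?, (by decide : Int.emod 2 3 = 2), (by decide : Int.emod 3 3 = 0), (by decide : Int.emod 4 3 = 1),
      h1, h2, show a0 ≠ a5 by omega, show a3 ≠ a5 by omega]
  · -- a3 < a0, a3 ≤ a5 : min = a3, idx = 1
    rw [if_pos h1] at h2
    simp [PySem.List.min?, pvShiftLines, PySem.List.pyGetD, PySem.List.pyGet?, PySem.List.pyIdx?, (by decide : Int.emod 1 3 = 1), (by decide : Int.emod 2 3 = 2), (by decide : Int.emod 3 3 = 0),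
      h1, h2, show a0 ≠ a3 by omega]
  · -- a0 ≤ a3, a5 < a0 : min = a5, idx = 2
    rw [if_neg h1] at h2
    simp [PySem.List.min?, pvShiftLines, PySem.List.pyGetD, PySem.List.pyGet?, PySem.List.pyIdx?, (by decide : Int.emod 2 3 = 2), (by decide : Int.emod 3 3 = 0), (by decide : Int.emod 4 3 = 1),
      h1, h2, show a0 ≠ a5 by omega, show a3 ≠ a5 by omega]
  · -- a0 ≤ a3, a0 ≤ a5 : min = a0, idx = 0
    rw [if_neg h1] at h2
    simp [PySem.List.min?, pvShiftLines, PySem.List.pyGetD, PySem.List.pyGet?, PySem.List.pyIdx?, (by decide : Int.emod 0 3 = 0), (by decide : Int.emod 1 3 = 1), (by decide : Int.emod 2 3 = 2),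
      h1, h2]
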